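-- pv_equiv track=rewrite | github.com/bitwisecook/tcl-lsp | core/analysis/checks/_helpers.py | _parse_subst_flags
-- ===== SOURCE A (Python) =====
-- def _parse_subst_flags(args: list[str]) -> tuple[int | None, bool, bool, bool]:
--     """Parse subst flags, return (template_idx, nocommands, novariables, nobackslashes)."""
--     nocommands = False
--     novariables = False
--     nobackslashes = False
--     template_idx = None
--     for i, text in enumerate(args):
--         if text == "-nocommands":
--             nocommands = True
--         elif text == "-novariables":
--             novariables = True
--         elif text == "-nobackslashes":
--             nobackslashes = True
--         elif text.startswith("-"):
--             continue
--         else: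
--             template_idx = i
--             break
--     return template_idx, nocommands, novariables, nobackslashes
-- ===== SOURCE B (Python) =====
-- def _parse_subst_flags(args: list[str]) -> tuple[int | None, bool, bool, bool]:
--     """Parse subst flags, return (template_idx, nocommands, novariables, nobackslashes)."""
--     template_idx = next((i for i, t in enumerate(args) if not t.startswith("-")), None)
--     prefix = args if template_idx is None else args[:template_idx]
--     return (
--         template_idx,
--         "-nocommands" in prefix,
--         "-novariables" in prefix,
--         "-nobackslashes" in prefix,
--     )
-- ===== Notes on version B (the rewrite author's own statement) =====
-- stated objective: simpler
-- what changed: Replaced the interleaved single loop with flag state and break by two separate passes: find the first non-dash token's index, then answer the three flags by membership tests on the prefix before it.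
import Mathlib
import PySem

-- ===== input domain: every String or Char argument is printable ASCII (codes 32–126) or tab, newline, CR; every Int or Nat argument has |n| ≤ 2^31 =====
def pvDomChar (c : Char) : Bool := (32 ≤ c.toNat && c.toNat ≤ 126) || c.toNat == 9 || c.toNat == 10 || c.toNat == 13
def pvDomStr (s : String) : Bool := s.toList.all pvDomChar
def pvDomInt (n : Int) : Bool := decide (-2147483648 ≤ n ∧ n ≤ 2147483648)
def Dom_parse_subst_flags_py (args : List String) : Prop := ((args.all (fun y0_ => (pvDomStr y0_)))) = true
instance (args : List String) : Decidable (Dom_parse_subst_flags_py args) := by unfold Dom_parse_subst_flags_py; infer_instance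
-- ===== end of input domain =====

-- B re-implements _parse_subst_flags as two separate passes (find first non-dash index, then membership tests on the prefix) instead of A's single flag-accumulating loop with break; same cost, simpler decomposition.

-- ===== PORT A =====
-- single pass: flag state + enumerate index, break at first non-dash token
def pvALoop : List String → Nat → Bool → Bool → Bool → Option Int × Bool × Bool × Bool
  | [], _, nc, nv, nb => (none, nc, nv, nb)
  | t :: rest, i, nc, nv, nb =>
    if t = "-nocommands" then pvALoop rest (i+1) true nv nb
    else if t = "-novariables" then pvALoop rest (i+1) nc true nb
    else if t = "-nobackslashes" then pvALoop rest (i+1) nc nv true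
    else if PySem.Str.startswith t "-" then pvALoop rest (i+1) nc nv nb
    else (some (i : Int), nc, nv, nb)

def parse_subst_flags_py (args : List String) : Option Int × Bool × Bool × Bool :=
  pvALoop args 0 false false false

-- ===== PORT B =====
-- pass 1: next((i for i, t in enumerate(args) if not t.startswith("-")), None)
def pvFindIdx : List String → Nat → Option Nat
  | [], _ => none
  | t :: rest, i => if PySem.Str.startswith t "-" then pvFindIdx rest (i+1) else some i

-- pass 2: membership tests on the prefix args[:template_idx] (args[:i] with i ≥ 0 is List.take i)
def parse_subst_flags_py_alt (args : List String) : Option Int × Bool × Bool × Bool :=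
  let idx := pvFindIdx args 0
  let prefx := match idx with | none => args | some i => args.take i
  (idx.map (fun n => (n : Int)),
   prefx.contains "-nocommands",
   prefx.contains "-novariables",
   prefx.contains "-nobackslashes")

-- ===== PRECONDITION & SPEC =====
def Spec_parse_subst_flags_py (args : List String) (out : Option Int × Bool × Bool × Bool) : Prop := out = parse_subst_flags_py_alt args
instance (args : List String) (out : Option Int × Bool × Bool × Bool) : Decidable (Spec_parse_subst_flags_py args out) := by unfold Spec_parse_subst_flags_py; infer_instance

-- ===== CLAIM (what is proved, stated in full; the proofs are below) =====
def Claim_equal_parse_subst_flags_py : Prop := ∀ (args : List String), Dom_parse_subst_flags_py args → Spec_parse_subst_flags_py args (parse_subst_flags_py args)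

-- ===== LEMMAS AND PROOFS =====



theorem pvFindIdx_ge : ∀ (args : List String) (i j : Nat), pvFindIdx args i = some j → i ≤ j := by
  intro args
  induction args with
  | nil => intro i j h; simp [pvFindIdx] at h
  | cons t rest ih =>
    intro i j h
    rw [pvFindIdx] at h
    by_cases hs : PySem.Str.startswith t "-" = true
    · rw [if_pos hs] at h
      have := ih (i+1) j h
      omega
    · rw [if_neg hs] at h
      cases h
      omega

theorem pvPrefix_eq : ∀ (args : List String) (i : Nat),
    (match pvFindIdx args i with | none => args | some j => args.take (j - i)) =
      args.takeWhile (fun t => PySem.Str.startswith t "-") := by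
  intro args
  induction args with
  | nil => intro i; simp [pvFindIdx]
  | cons t rest ih =>
    intro i
    rw [pvFindIdx, List.takeWhile_cons]
    by_cases hs : PySem.Str.startswith t "-" = true
    · rw [if_pos hs, if_pos hs, ← ih (i+1)]
      cases h : pvFindIdx rest (i+1) with
      | none => rfl
      | some j =>
        have hij := pvFindIdx_ge rest (i+1) j h
        have hj : j - i = (j - (i+1)) + 1 := by omega
        simp only [hj, List.take_succ_cons]
    · rw [if_neg hs, if_neg hs]
      simp

theorem pvALoop_eq : ∀ (args : List String) (i : Nat) (nc nv nb : Bool),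
    pvALoop args i nc nv nb =
      ((pvFindIdx args i).map (fun n => (n : Int)),
       nc || (args.takeWhile (fun t => PySem.Str.startswith t "-")).contains "-nocommands",
       nv || (args.takeWhile (fun t => PySem.Str.startswith t "-")).contains "-novariables",
       nb || (args.takeWhile (fun t => PySem.Str.startswith t "-")).contains "-nobackslashes") := by
  intro args
  induction args with
  | nil => intro i nc nv nb; simp [pvALoop, pvFindIdx]
  | cons t rest ih =>
    intro i nc nv nb
    rw [pvALoop, pvFindIdx, List.takeWhile_cons]
    by_cases h1 : t = "-nocommands"
    · have hs : PySem.Str.startswith t "-" = true := by subst h1; decide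
      rw [if_pos h1, if_pos hs, if_pos hs, ih]
      subst h1
      simp
    · by_cases h2 : t = "-novariables"
      · have hs : PySem.Str.startswith t "-" = true := by subst h2; decide
        rw [if_neg h1, if_pos h2, if_pos hs, if_pos hs, ih]
        subst h2
        simp
      · by_cases h3 : t = "-nobackslashes"
        · have hs : PySem.Str.startswith t "-" = true := by subst h3; decide
          rw [if_neg h1, if_neg h2, if_pos h3, if_pos hs, if_pos hs, ih]
          subst h3
          simp
        · by_cases hs : PySem.Str.startswith t "-" = true
          · have hs' : PySem.Chars.startswith t.toList ['-'] = true := by simpa using hs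
            have h1' : ¬ ("-nocommands" = t) := fun h => h1 h.symm
            have h2' : ¬ ("-novariables" = t) := fun h => h2 h.symm
            have h3' : ¬ ("-nobackslashes" = t) := fun h => h3 h.symm
            rw [if_neg h1, if_neg h2, if_neg h3, if_pos hs, if_pos hs, ih]
            simp [hs', h1', h2', h3']
          · have hs' : ¬ PySem.Chars.startswith t.toList ['-'] = true := by simpa using hs
            rw [if_neg h1, if_neg h2, if_neg h3, if_neg hs, if_neg hs]
            simp [hs']

-- ===== VERDICT =====
theorem parse_subst_flags_py_spec : Claim_equal_parse_subst_flags_py := by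
  intro args _
  unfold Spec_parse_subst_flags_py parse_subst_flags_py parse_subst_flags_py_alt
  rw [pvALoop_eq]
  have hp := pvPrefix_eq args 0
  simp only [Nat.sub_zero] at hp
  rw [← hp]
  cases h : pvFindIdx args 0 <;> simp
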